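-- pv_equiv track=rewrite | github.com/hashTB/providerView | analyze_providers.py | detect_cohort_from_protocols
-- ===== SOURCE A (Python) =====
-- def detect_cohort_from_protocols(protocols: list[str]) -> tuple[bool, bool, bool]:
--     """
--     Detect SDK/Framework cohort based on protocol versions.
--     Returns: (framework_only, sdkv2_only, framework_sdkv2)
--     """
--     has_v4 = any('4' in str(p) for p in protocols)
--     has_v5 = any('5' in str(p) for p in protocols)
--     has_v6 = any('6' in str(p) for p in protocols)
--
--     framework_only = has_v6 and not has_v5 and not has_v4
--     sdkv2_only = (has_v5 or has_v4) and not has_v6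
--     framework_sdkv2 = has_v6 and (has_v5 or has_v4)
--
--     return framework_only, sdkv2_only, framework_sdkv2
-- ===== SOURCE B (Python) =====
-- def detect_cohort_from_protocols(protocols: list[str]) -> tuple[bool, bool, bool]:
--     """Single pass over protocols with early exit once all three flags are set."""
--     has_v4 = has_v5 = has_v6 = False
--     for p in protocols:
--         s = str(p)
--         if '4' in s:
--             has_v4 = True
--         if '5' in s:
--             has_v5 = True
--         if '6' in s:
--             has_v6 = True
--         if has_v4 and has_v5 and has_v6:
--             break
--     framework_only = has_v6 and not has_v5 and not has_v4
--     sdkv2_only = (has_v5 or has_v4) and not has_v6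
--     framework_sdkv2 = has_v6 and (has_v5 or has_v4)
--     return framework_only, sdkv2_only, framework_sdkv2
-- ===== Notes on version B (the rewrite author's own statement) =====
-- stated objective: faster
-- what changed: Replaced three independent any() scans of the list with one fused loop that maintains three boolean flags and breaks early once all three are set.
import Mathlib
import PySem

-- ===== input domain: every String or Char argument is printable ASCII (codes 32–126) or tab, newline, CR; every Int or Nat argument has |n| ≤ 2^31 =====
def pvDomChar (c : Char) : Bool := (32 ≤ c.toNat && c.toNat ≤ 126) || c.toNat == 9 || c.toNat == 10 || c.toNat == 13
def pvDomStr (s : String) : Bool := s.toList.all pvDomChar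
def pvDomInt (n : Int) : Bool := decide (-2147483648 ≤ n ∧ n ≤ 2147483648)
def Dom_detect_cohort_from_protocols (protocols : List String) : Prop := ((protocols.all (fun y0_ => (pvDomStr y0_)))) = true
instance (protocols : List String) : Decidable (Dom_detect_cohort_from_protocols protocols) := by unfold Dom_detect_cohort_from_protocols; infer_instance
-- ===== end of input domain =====

-- B fuses A's three any() scans into one loop with three flags and an early break; outputs identical.

-- ===== PORT A =====
-- '4' in str(p): p is already a string, and a one-character needle is in a string iff the character occurs in it
def detect_cohort_from_protocols (protocols : List String) : Bool × Bool × Bool :=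
  let has_v4 := protocols.any (fun p => p.toList.contains '4')
  let has_v5 := protocols.any (fun p => p.toList.contains '5')
  let has_v6 := protocols.any (fun p => p.toList.contains '6')
  let framework_only := has_v6 && !has_v5 && !has_v4
  let sdkv2_only := (has_v5 || has_v4) && !has_v6
  let framework_sdkv2 := has_v6 && (has_v5 || has_v4)
  (framework_only, sdkv2_only, framework_sdkv2)

-- ===== PORT B =====
-- the fused loop with early break (B's 'for … break')
def pvCohortLoop : List String → Bool → Bool → Bool → Bool × Bool × Bool
  | [], has_v4, has_v5, has_v6 => (has_v4, has_v5, has_v6)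
  | p :: ps, has_v4, has_v5, has_v6 =>
      let has_v4 := if p.toList.contains '4' then true else has_v4
      let has_v5 := if p.toList.contains '5' then true else has_v5
      let has_v6 := if p.toList.contains '6' then true else has_v6
      if has_v4 && has_v5 && has_v6 then (has_v4, has_v5, has_v6)
      else pvCohortLoop ps has_v4 has_v5 has_v6

def detect_cohort_from_protocols_alt (protocols : List String) : Bool × Bool × Bool :=
  let (has_v4, has_v5, has_v6) := pvCohortLoop protocols false false false
  let framework_only := has_v6 && !has_v5 && !has_v4
  let sdkv2_only := (has_v5 || has_v4) && !has_v6
  let framework_sdkv2 := has_v6 && (has_v5 || has_v4)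
  (framework_only, sdkv2_only, framework_sdkv2)

-- ===== PRECONDITION & SPEC =====
def Spec_detect_cohort_from_protocols (protocols : List String) (out : Bool × Bool × Bool) : Prop := out = detect_cohort_from_protocols_alt protocols
instance (protocols : List String) (out : Bool × Bool × Bool) : Decidable (Spec_detect_cohort_from_protocols protocols out) := by unfold Spec_detect_cohort_from_protocols; infer_instance

-- ===== CLAIM (what is proved, stated in full; the proofs are below) =====
def Claim_equal_detect_cohort_from_protocols : Prop := ∀ (protocols : List String), Dom_detect_cohort_from_protocols protocols → Spec_detect_cohort_from_protocols protocols (detect_cohort_from_protocols protocols)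

-- ===== LEMMAS AND PROOFS =====
theorem pvCohortLoop_eq (ps : List String) (a b c : Bool) :
    pvCohortLoop ps a b c =
      (a || ps.any (fun p => p.toList.contains '4'),
       b || ps.any (fun p => p.toList.contains '5'),
       c || ps.any (fun p => p.toList.contains '6')) := by
  induction ps generalizing a b c with
  | nil => simp [pvCohortLoop]
  | cons p ps ih =>
      simp only [pvCohortLoop, List.any_cons]
      split_ifs <;> (try simp only [ih]) <;> simp_all

-- ===== VERDICT (by name: the statement is the Claim_ definition above) =====
theorem detect_cohort_from_protocols_spec : Claim_equal_detect_cohort_from_protocols := by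
  intro protocols _
  unfold Spec_detect_cohort_from_protocols detect_cohort_from_protocols detect_cohort_from_protocols_alt
  rw [pvCohortLoop_eq]
  simp
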